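-- pv_equiv track=rewrite | github.com/charlie42/diagnosis-predictor | src/data/create_datasets.py | customize_input_cols_per_diag
-- ===== SOURCE A (Python) =====
-- def customize_input_cols_per_diag(input_cols, diag):
--     # Remove "Diag.Intellectual Disability-Mild" when predicting "Diag.Borderline Intellectual Functioning"
--     #   and vice versa because they are highly correlated, same for other diagnoses
--     #   (only useful when use_other_diags_as_input = 1)
--
--     if diag == "Diag.Intellectual Disability-Mild":
--         input_cols = [x for x in input_cols if x != "Diag.Borderline Intellectual Functioning"]
--     if diag == "Diag.Borderline Intellectual Functioning":
--         input_cols = [x for x in input_cols if x != "Diag.Intellectual Disability-Mild"]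
--     if diag == "Diag.No Diagnosis Given":
--         input_cols = [x for x in input_cols if not x.startswith("Diag.")]
--     if diag == "Diag.ADHD-Combined Type":
--         input_cols = [x for x in input_cols if x not in ["Diag.ADHD-Inattentive Type",
--                                                          "Diag.ADHD-Hyperactive/Impulsive Type",
--                                                          "Diag.Other Specified Attention-Deficit/Hyperactivity Disorder",
--                                                          "Diag.Unspecified Attention-Deficit/Hyperactivity Disorder"]]
--     if diag == "Diag.ADHD-Inattentive Type":
--         input_cols = [x for x in input_cols if x not in ["Diag.ADHD-Combined Type",
--                                                          "Diag.ADHD-Hyperactive/Impulsive Type",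
--                                                          "Diag.Other Specified Attention-Deficit/Hyperactivity Disorder",
--                                                          "Diag.Unspecified Attention-Deficit/Hyperactivity Disorder"]]
--
--     # Remove NIH scores for NVLD (used for diagnosis)
--     if "NVLD" in diag:
--         input_cols = [x for x in input_cols if not x.startswith("NIH")]
--
--     return input_cols
-- ===== SOURCE B (Python) =====
-- def customize_input_cols_per_diag(input_cols, diag):
--     # Precompute an exclusion spec, then filter in a single pass.
--     adhd_related = ["Diag.ADHD-Combined Type",
--                     "Diag.ADHD-Inattentive Type",
--                     "Diag.ADHD-Hyperactive/Impulsive Type",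
--                     "Diag.Other Specified Attention-Deficit/Hyperactivity Disorder",
--                     "Diag.Unspecified Attention-Deficit/Hyperactivity Disorder"]
--     exact_drops = {
--         "Diag.Intellectual Disability-Mild":
--             frozenset(["Diag.Borderline Intellectual Functioning"]),
--         "Diag.Borderline Intellectual Functioning":
--             frozenset(["Diag.Intellectual Disability-Mild"]),
--         "Diag.ADHD-Combined Type":
--             frozenset(c for c in adhd_related if c != "Diag.ADHD-Combined Type"),
--         "Diag.ADHD-Inattentive Type":
--             frozenset(c for c in adhd_related if c != "Diag.ADHD-Inattentive Type"),
--     }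
--     dropped = exact_drops.get(diag, frozenset())
--     drop_all_diag = diag == "Diag.No Diagnosis Given"
--     drop_nih = "NVLD" in diag
--     return [x for x in input_cols
--             if x not in dropped
--             and not (drop_all_diag and x.startswith("Diag."))
--             and not (drop_nih and x.startswith("NIH"))]
-- ===== Notes on version B (the rewrite author's own statement) =====
-- stated objective: alternative
-- what changed: A applies up to six sequential list-comprehension filter passes guarded by if-statements; B first builds an exclusion specification (a dict mapping each exact-match diag to a frozenset of columns to drop, plus two boolean flags for the Diag.*-prefix and NIH-prefix cases) and then filters input_cols in a single pass against that spec.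
import Mathlib
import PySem

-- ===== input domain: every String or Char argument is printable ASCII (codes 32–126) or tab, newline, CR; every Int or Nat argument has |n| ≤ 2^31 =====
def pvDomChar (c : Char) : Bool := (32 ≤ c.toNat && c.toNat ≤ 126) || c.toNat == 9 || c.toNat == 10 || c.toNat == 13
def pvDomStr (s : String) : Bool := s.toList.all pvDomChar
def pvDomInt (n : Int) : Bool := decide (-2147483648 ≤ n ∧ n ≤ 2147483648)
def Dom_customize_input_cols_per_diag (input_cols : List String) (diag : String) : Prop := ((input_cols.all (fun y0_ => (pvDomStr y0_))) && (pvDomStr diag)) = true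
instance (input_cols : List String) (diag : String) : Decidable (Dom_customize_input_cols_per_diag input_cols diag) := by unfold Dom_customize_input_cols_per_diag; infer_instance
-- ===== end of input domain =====

-- B precomputes an exclusion spec (exact-drop table + two flags) and filters input_cols in one pass,
-- replacing A's six sequential filtering passes (alternative decomposition, same asymptotic cost).


-- ===== PORT A =====
def customize_input_cols_per_diag (input_cols : List String) (diag : String) : List String :=
  let c1 := if diag == "Diag.Intellectual Disability-Mild" then
      input_cols.filter (fun x => x != "Diag.Borderline Intellectual Functioning") else input_cols
  let c2 := if diag == "Diag.Borderline Intellectual Functioning" then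
      c1.filter (fun x => x != "Diag.Intellectual Disability-Mild") else c1
  let c3 := if diag == "Diag.No Diagnosis Given" then
      c2.filter (fun x => !(PySem.Str.startswith x "Diag.")) else c2
  let c4 := if diag == "Diag.ADHD-Combined Type" then
      c3.filter (fun x => !(["Diag.ADHD-Inattentive Type",
                             "Diag.ADHD-Hyperactive/Impulsive Type",
                             "Diag.Other Specified Attention-Deficit/Hyperactivity Disorder",
                             "Diag.Unspecified Attention-Deficit/Hyperactivity Disorder"].contains x)) else c3
  let c5 := if diag == "Diag.ADHD-Inattentive Type" then
      c4.filter (fun x => !(["Diag.ADHD-Combined Type",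
                             "Diag.ADHD-Hyperactive/Impulsive Type",
                             "Diag.Other Specified Attention-Deficit/Hyperactivity Disorder",
                             "Diag.Unspecified Attention-Deficit/Hyperactivity Disorder"].contains x)) else c4
  let c6 := if PySem.Str.isIn "NVLD" diag then
      c5.filter (fun x => !(PySem.Str.startswith x "NIH")) else c5
  c6

-- ===== PORT B =====
def pvAdhdRelated : List String :=
  ["Diag.ADHD-Combined Type",
   "Diag.ADHD-Inattentive Type",
   "Diag.ADHD-Hyperactive/Impulsive Type",
   "Diag.Other Specified Attention-Deficit/Hyperactivity Disorder",
   "Diag.Unspecified Attention-Deficit/Hyperactivity Disorder"]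

def pvExactDrops : PySem.Dict String (PySem.Set String) :=
  PySem.Dict.ofList
    [("Diag.Intellectual Disability-Mild",
        PySem.Set.ofList ["Diag.Borderline Intellectual Functioning"]),
     ("Diag.Borderline Intellectual Functioning",
        PySem.Set.ofList ["Diag.Intellectual Disability-Mild"]),
     ("Diag.ADHD-Combined Type",
        PySem.Set.ofList (pvAdhdRelated.filter (fun c => c != "Diag.ADHD-Combined Type"))),
     ("Diag.ADHD-Inattentive Type",
        PySem.Set.ofList (pvAdhdRelated.filter (fun c => c != "Diag.ADHD-Inattentive Type")))]

def customize_input_cols_per_diag_alt (input_cols : List String) (diag : String) : List String :=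
  let dropped := pvExactDrops.getD diag PySem.Set.empty
  let dropAllDiag := diag == "Diag.No Diagnosis Given"
  let dropNih := PySem.Str.isIn "NVLD" diag
  input_cols.filter (fun x =>
    !(PySem.Set.contains dropped x)
    && !(dropAllDiag && PySem.Str.startswith x "Diag.")
    && !(dropNih && PySem.Str.startswith x "NIH"))

-- ===== PRECONDITION & SPEC =====
def Spec_customize_input_cols_per_diag (input_cols : List String) (diag : String) (out : List String) : Prop := out = customize_input_cols_per_diag_alt input_cols diag
instance (input_cols : List String) (diag : String) (out : List String) : Decidable (Spec_customize_input_cols_per_diag input_cols diag out) := by unfold Spec_customize_input_cols_per_diag; infer_instance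

-- ===== CLAIM (what is proved, stated in full; the proofs are below) =====
def Claim_equal_customize_input_cols_per_diag : Prop := ∀ (input_cols : List String) (diag : String), Dom_customize_input_cols_per_diag input_cols diag → Spec_customize_input_cols_per_diag input_cols diag (customize_input_cols_per_diag input_cols diag)

-- ===== LEMMAS AND PROOFS =====

-- ===== VERDICT (by name: the statement is the Claim_ definition above) =====
theorem customize_input_cols_per_diag_spec : Claim_equal_customize_input_cols_per_diag := by
  intro input_cols diag _
  unfold Spec_customize_input_cols_per_diag
  unfold customize_input_cols_per_diag customize_input_cols_per_diag_alt
  by_cases h1 : diag = "Diag.Intellectual Disability-Mild"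
  · subst h1
    have hnv : PySem.Str.isIn "NVLD" "Diag.Intellectual Disability-Mild" = false := by decide
    have hget : pvExactDrops.getD "Diag.Intellectual Disability-Mild" PySem.Set.empty = (["Diag.Borderline Intellectual Functioning"] : List String) := by decide
    simp at hnv hget
    simp [hnv, hget, PySem.Set.contains, bne]
    refine List.filter_congr fun x _ => ?_
    simp [beq_eq_decide]
  by_cases h2 : diag = "Diag.Borderline Intellectual Functioning"
  · subst h2
    have hnv : PySem.Str.isIn "NVLD" "Diag.Borderline Intellectual Functioning" = false := by decide
    have hget : pvExactDrops.getD "Diag.Borderline Intellectual Functioning" PySem.Set.empty = (["Diag.Intellectual Disability-Mild"] : List String) := by decide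
    simp at hnv hget
    simp [hnv, hget, PySem.Set.contains, bne]
    refine List.filter_congr fun x _ => ?_
    simp [beq_eq_decide]
  by_cases h3 : diag = "Diag.No Diagnosis Given"
  · subst h3
    have hnv : PySem.Str.isIn "NVLD" "Diag.No Diagnosis Given" = false := by decide
    have hget : pvExactDrops.getD "Diag.No Diagnosis Given" PySem.Set.empty = ([] : List String) := by decide
    simp at hnv hget
    simp [hnv, hget, PySem.Set.contains]
  by_cases h4 : diag = "Diag.ADHD-Combined Type"
  · subst h4
    have hnv : PySem.Str.isIn "NVLD" "Diag.ADHD-Combined Type" = false := by decide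
    have hget : pvExactDrops.getD "Diag.ADHD-Combined Type" PySem.Set.empty = (["Diag.ADHD-Inattentive Type", "Diag.ADHD-Hyperactive/Impulsive Type", "Diag.Other Specified Attention-Deficit/Hyperactivity Disorder", "Diag.Unspecified Attention-Deficit/Hyperactivity Disorder"] : List String) := by decide
    simp at hnv hget
    simp [hnv, hget, PySem.Set.contains]
  by_cases h5 : diag = "Diag.ADHD-Inattentive Type"
  · subst h5
    have hnv : PySem.Str.isIn "NVLD" "Diag.ADHD-Inattentive Type" = false := by decide
    have hget : pvExactDrops.getD "Diag.ADHD-Inattentive Type" PySem.Set.empty = (["Diag.ADHD-Combined Type", "Diag.ADHD-Hyperactive/Impulsive Type", "Diag.Other Specified Attention-Deficit/Hyperactivity Disorder", "Diag.Unspecified Attention-Deficit/Hyperactivity Disorder"] : List String) := by decide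
    simp at hnv hget
    simp [hnv, hget, PySem.Set.contains]
  have h3' : (diag == "Diag.No Diagnosis Given") = false := by simp [h3]
  have hget : pvExactDrops.getD diag PySem.Set.empty = PySem.Set.empty := by
    simp [pvExactDrops, PySem.Dict.ofList, PySem.Dict.update, PySem.Dict.getD_insert, h1, h2, h4, h5]
  simp at hget
  by_cases h6 : PySem.Str.isIn "NVLD" diag = true
  · simp at h6
    simp [h1, h2, h3', h4, h5, h6, hget, PySem.Set.contains]
  · simp at h6
    simp [h1, h2, h3', h4, h5, h6, hget, PySem.Set.contains]
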